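-- pv_equiv track=rewrite | github.com/arud3nko/lidar-anode | app/tests/scanLidar.py | count_mode
-- ===== SOURCE A (Python) =====
-- def count_mode(array):
--     mode = {array[i]: 0 for i in range(len(array))}
--     for i in array:
--         mode[i] += 1
--     mode_val = sorted(mode, key=mode.get, reverse=True)[0]
--     if(mode_val == -1):
--         if(len(mode) > 1):
--             mode_val = sorted(mode, key=mode.get, reverse=True)[1]
--
--     return mode_val, mode[mode_val]
-- ===== SOURCE B (Python) =====
-- def _best(items):
--     v, c = items[0]
--     for k, cc in items[1:]:
--         if cc > c:
--             v, c = k, cc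
--     return v, c
--
--
-- def count_mode(array):
--     counts = {}
--     for x in array:
--         counts[x] = counts.get(x, 0) + 1
--     v, c = _best(list(counts.items()))
--     if v == -1 and len(counts) > 1:
--         v, c = _best([(k, cc) for k, cc in counts.items() if k != -1])
--     return v, c
-- ===== Notes on version B (the rewrite author's own statement) =====
-- stated objective: alternative
-- what changed: B replaces A's two dict-building passes plus a full stable sort of the distinct keys by one counting pass and a linear first-wins max scan over the counter items (re-scanned once without key -1 when -1 wins), with identical insertion-order tie-breaking; intended as faster (O(n+k) vs O(n+k log k)) but measured only ~1.2-1.7x on generated inputs.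
import Mathlib
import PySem

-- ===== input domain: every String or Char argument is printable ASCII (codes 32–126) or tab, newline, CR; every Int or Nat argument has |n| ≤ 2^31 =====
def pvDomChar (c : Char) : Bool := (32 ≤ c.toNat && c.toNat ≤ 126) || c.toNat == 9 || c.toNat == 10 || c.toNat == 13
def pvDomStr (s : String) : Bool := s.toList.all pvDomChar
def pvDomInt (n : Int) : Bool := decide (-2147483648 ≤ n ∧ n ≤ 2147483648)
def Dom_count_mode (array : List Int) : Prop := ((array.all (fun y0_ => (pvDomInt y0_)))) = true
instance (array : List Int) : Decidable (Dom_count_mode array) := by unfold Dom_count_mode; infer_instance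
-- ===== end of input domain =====

-- B replaces A's stable sort of the distinct keys by linear first-wins max scans over the counter items (same value, same tie-breaking).


-- ===== PORT A =====
-- literal port of A: build {array[i]: 0 for i in range(len(array))}, the `mode[i] += 1` pass
-- (Dict.modify with default 0: the key is always present, so it is exactly `mode[i] += 1`),
-- then sorted(mode, key=mode.get, reverse=True) with its element at index 0 (and, recomputed
-- as in A, index 1) — in range whenever the dict is nonempty, i.e. array ≠ [], which Pre_ guarantees.
def count_mode (array : List Int) : Int × Int :=
  let mode0 : PySem.Dict Int Int :=
    (PySem.List.pyRange 0 (PySem.List.len array)).foldl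
      (fun d i => d.insert (PySem.List.pyGetD array i 0) 0) PySem.Dict.empty
  let mode := array.foldl (fun d i => d.modify i 0 (· + 1)) mode0
  let mv0 := PySem.List.pyGetD (PySem.List.sorted mode.keys (fun k => mode.getD k 0) true) 0 0
  let mode_val :=
    if mv0 = -1 then
      if 1 < mode.size then
        PySem.List.pyGetD (PySem.List.sorted mode.keys (fun k => mode.getD k 0) true) 1 0
      else mv0
    else mv0
  (mode_val, mode.getD mode_val 0)

-- ===== PORT B =====
-- _best(items): v, c = the first item; a later pair replaces it only on a strictly larger count.
-- The two empty-list match arms are unreachable under Pre_ (Python B raises IndexError on the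
-- first-item access only for an empty array, which Pre_ excludes; the filtered list is nonempty
-- whenever the best key is -1 and there is more than one key).
def bestScan (p : Int × Int) (rest : List (Int × Int)) : Int × Int :=
  rest.foldl (fun b q => if b.2 < q.2 then q else b) p

def count_mode_alt (array : List Int) : Int × Int :=
  let counts := array.foldl (fun d x => d.insert x (d.getD x 0 + 1)) PySem.Dict.empty
  match counts.items with
  | [] => (0, 0)
  | p :: rest =>
    let bc := bestScan p rest
    if bc.1 = -1 ∧ 1 < counts.size then
      match counts.items.filter (fun q => q.1 != -1) with
      | [] => bc
      | q :: rest2 => bestScan q rest2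
    else bc

-- ===== PRECONDITION & SPEC =====
-- Pre_ excludes only the empty list, on which A raises IndexError (indexing the sort of an empty dict).
def Pre_count_mode (array : List Int) : Prop := array ≠ []
instance (array : List Int) : Decidable (Pre_count_mode array) := by unfold Pre_count_mode; infer_instance
def pvWitness_count_mode : List Int := [1, -1, 2, 2, -1, -1]
def Spec_count_mode (array : List Int) (out : Int × Int) : Prop := out = count_mode_alt array
instance (array : List Int) (out : Int × Int) : Decidable (Spec_count_mode array out) := by unfold Spec_count_mode; infer_instance

-- ===== CLAIM (what is proved, stated in full; the proofs are below) =====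
def Claim_equal_count_mode : Prop := ∀ (array : List Int), Dom_count_mode array → Pre_count_mode array → Spec_count_mode array (count_mode array)

-- ===== LEMMAS AND PROOFS =====

theorem dict_eq_of_items_eq (d e : PySem.Dict Int Int) (h : d.items = e.items) : d = e := by
  cases d; cases e; simpa [PySem.Dict.items] using h

-- the {array[i]: 0 …} comprehension keeps first-occurrence key order, all values 0
theorem ins0_items (l : List Int) : ∀ (S : List Int),
    (l.foldl (fun d x => PySem.Dict.insert d x (0 : Int)) ⟨S.map (fun k => (k, (0 : Int)))⟩).items
      = (PySem.Set.update S l).map (fun k => (k, (0 : Int))) := by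
  induction l with
  | nil => intro S; simp [PySem.Set.update]
  | cons x l ih =>
    intro S
    have hins : (PySem.Dict.insert (⟨S.map (fun k => (k,(0:Int)))⟩ : PySem.Dict Int Int) x 0)
        = ⟨(PySem.Set.add S x).map (fun k => (k,(0:Int)))⟩ := by
      by_cases hx : x ∈ S
      · simp only [PySem.Dict.insert, PySem.Dict.contains, PySem.Set.add, PySem.Set.contains]
        simp [hx, List.map_map]
        exact fun a _ h => h.symm
      · simp [PySem.Dict.insert, PySem.Dict.contains, PySem.Set.add, hx, PySem.Set.contains]
    simp only [List.foldl_cons, hins, ih, PySem.Set.update]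

theorem getD_map_mk (S : List Int) (g : Int → Int) (x : Int) (hxS : x ∈ S) :
    (PySem.Dict.getD (⟨S.map (fun k => (k, g k))⟩ : PySem.Dict Int Int) x 0) = g x := by
  have hf : (List.find? (fun k => k == x) S).isSome := by
    rw [List.find?_isSome]; exact ⟨x, hxS, by simp⟩
  obtain ⟨y, hy⟩ := Option.isSome_iff_exists.mp hf
  have hyx : y = x := by simpa using List.find?_some hy
  simp only [PySem.Dict.getD, PySem.Dict.get?, List.find?_map,
    Function.comp_def]
  simp only [hy, hyx]
  simp

-- the `mode[i] += 1` pass on a dict with items S.map (k, g k): in-place value updates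
theorem mod_items (l : List Int) : ∀ (S : List Int) (g : Int → Int), (∀ x ∈ l, x ∈ S) →
    (l.foldl (fun d i => PySem.Dict.modify d i 0 (· + 1)) ⟨S.map (fun k => (k, g k))⟩).items
      = S.map (fun k => (k, g k + (l.count k : Int))) := by
  induction l with
  | nil => intro S g _; simp
  | cons x l ih =>
    intro S g hmem
    have hxS : x ∈ S := hmem x (by simp)
    have hmod : (PySem.Dict.modify (⟨S.map (fun k => (k, g k))⟩ : PySem.Dict Int Int) x 0 (· + 1))
        = ⟨S.map (fun k => (k, (fun k => if k = x then g x + 1 else g k) k))⟩ := by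
      simp only [PySem.Dict.modify, getD_map_mk S g x hxS, PySem.Dict.insert,
        PySem.Dict.contains]
      rw [if_pos (by simpa using hxS)]
      simp only [List.map_map]
      congr 1
      refine List.map_congr_left fun k _ => ?_
      by_cases hk : k = x
      · simp [hk]
      · simp [Function.comp, hk]
    rw [List.foldl_cons, hmod, ih _ _ (fun y hy => hmem y (by simp [hy]))]
    congr 1
    funext k
    by_cases hk : k = x
    · simp only [hk, List.count_cons_self, Prod.mk.injEq, true_and]
      push_cast; ring
    · simp [hk, Ne.symm hk]

-- A's dict is exactly Counter(array)
theorem aDict (array : List Int) :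
    array.foldl (fun d i => PySem.Dict.modify d i 0 (· + 1))
      ((PySem.List.pyRange 0 (PySem.List.len array)).foldl
        (fun d i => PySem.Dict.insert d (PySem.List.pyGetD array i 0) (0 : Int)) PySem.Dict.empty)
      = PySem.Dict.counter array := by
  have h1 : ((PySem.List.pyRange 0 (PySem.List.len array)).foldl
        (fun d i => PySem.Dict.insert d (PySem.List.pyGetD array i 0) (0 : Int)) PySem.Dict.empty)
      = array.foldl (fun d x => PySem.Dict.insert d x (0 : Int)) PySem.Dict.empty := by
    simpa using PySem.List.foldl_pyRange_pyGetD array 0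
      (fun d k => PySem.Dict.insert d k (0 : Int)) PySem.Dict.empty (a := 0) le_rfl
  have h2 : array.foldl (fun d x => PySem.Dict.insert d x (0 : Int)) PySem.Dict.empty
      = (⟨(PySem.Set.ofList array).map (fun k => (k, (0 : Int)))⟩ : PySem.Dict Int Int) := by
    apply dict_eq_of_items_eq
    simpa using ins0_items array []
  rw [h1, h2]
  apply dict_eq_of_items_eq
  rw [mod_items array (PySem.Set.ofList array) (fun _ => 0)
    (fun x hx => (PySem.Set.mem_ofList array x).mpr hx), PySem.Dict.items_counter]
  simp

-- first-wins running maximum, as an Option-state fold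
def runBest (f : Int → Int) (xs : List Int) : Option Int :=
  xs.foldl (fun o y => match o with
    | none => some y
    | some b => if f b < f y then some y else some b) none

theorem runBest_some (f : Int → Int) (t : List Int) : ∀ (b : Int),
    t.foldl (fun o y => match o with
      | none => some y
      | some b => if f b < f y then some y else some b) (some b)
      = some (t.foldl (fun b y => if f b < f y then y else b) b) := by
  induction t with
  | nil => intro b; simp
  | cons y t ih =>
    intro b
    simp only [List.foldl_cons]
    by_cases hc : f b < f y
    · simp [hc, ih]
    · simp [hc, ih]

theorem head?_insertBy (f : Int → Int) (x : Int) (l : List Int) :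
    (PySem.List.insertBy (fun a b => decide (f b < f a)) x l).head?
      = some (match l.head? with | none => x | some h => if f h < f x then x else h) := by
  cases l with
  | nil => simp [PySem.List.insertBy]
  | cons h t =>
    simp only [PySem.List.insertBy, List.head?_cons]
    by_cases hc : f h < f x
    · simp [hc]
    · simp [hc]

theorem head?_sorted_rev (f : Int → Int) (xs : List Int) :
    (PySem.List.sorted xs f true).head? = runBest f xs := by
  induction xs using List.reverseRecOn with
  | nil => simp [PySem.List.sorted, runBest]
  | append_singleton xs x ih =>
    rw [PySem.List.sorted_rev_eq_foldl_insertBy (xs ++ [x]) f]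
    rw [List.foldl_append, List.foldl_cons, List.foldl_nil, head?_insertBy]
    rw [runBest, List.foldl_append, List.foldl_cons, List.foldl_nil]
    rw [← PySem.List.sorted_rev_eq_foldl_insertBy xs f, ih]
    have hfold : (List.foldl (fun o y => match o with
        | none => some y
        | some b => if f b < f y then some y else some b) none xs) = runBest f xs := rfl
    rw [hfold]
    cases hr : runBest f xs with
    | none => simp
    | some b =>
      by_cases hc : f b < f x
      · simp [hc]
      · simp [hc]

theorem insertBy_perm (bef : Int → Int → Bool) (x : Int) (l : List Int) :
    (PySem.List.insertBy bef x l).Perm (x :: l) := by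
  induction l with
  | nil => simp [PySem.List.insertBy]
  | cons h t ih =>
    simp only [PySem.List.insertBy]
    by_cases hc : bef x h
    · simp [hc]
    · simp only [hc, if_false, Bool.false_eq_true]
      exact (ih.cons h).trans (List.Perm.swap x h t)

theorem sorted_rev_perm (f : Int → Int) (xs : List Int) :
    (PySem.List.sorted xs f true).Perm xs := by
  induction xs using List.reverseRecOn with
  | nil => simp [PySem.List.sorted]
  | append_singleton xs x ih =>
    rw [PySem.List.sorted_rev_eq_foldl_insertBy (xs ++ [x]) f, List.foldl_append,
      List.foldl_cons, List.foldl_nil, ← PySem.List.sorted_rev_eq_foldl_insertBy xs f]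
    exact ((insertBy_perm _ x _).trans (ih.cons x)).trans (List.perm_append_singleton x xs).symm

theorem insertBy_all_bef (f : Int → Int) (x : Int) (l : List Int)
    (h : ∀ y ∈ l, f y < f x) :
    PySem.List.insertBy (fun a b => decide (f b < f a)) x l = x :: l := by
  cases l with
  | nil => simp [PySem.List.insertBy]
  | cons a t => simp [PySem.List.insertBy, h a (by simp)]

theorem insertBy_cons_eq (bef : Int → Int → Bool) (x h : Int) (t : List Int) :
    PySem.List.insertBy bef x (h :: t)
      = if bef x h then x :: h :: t else h :: PySem.List.insertBy bef x t := rfl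

theorem pairwise_insertBy (f : Int → Int) (x : Int) (l : List Int)
    (h : l.Pairwise (fun a b => f b ≤ f a)) :
    (PySem.List.insertBy (fun a b => decide (f b < f a)) x l).Pairwise (fun a b => f b ≤ f a) := by
  induction l with
  | nil => simp [PySem.List.insertBy]
  | cons a t ih =>
    simp only [PySem.List.insertBy]
    rcases List.pairwise_cons.mp h with ⟨ha, ht⟩
    by_cases hc : f a < f x
    · simp only [hc, decide_true, if_true]
      refine List.pairwise_cons.mpr ⟨?_, h⟩
      intro y hy
      rcases List.mem_cons.mp hy with hy | hy
      · subst hy; exact le_of_lt hc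
      · exact le_of_lt (lt_of_le_of_lt (ha y hy) hc)
    · simp only [hc, decide_false, Bool.false_eq_true, if_false]
      refine List.pairwise_cons.mpr ⟨?_, ih ht⟩
      intro y hy
      rcases List.mem_cons.mp ((insertBy_perm (fun a b => decide (f b < f a)) x t).mem_iff.mp hy) with hy | hy
      · subst hy; exact not_lt.mp hc
      · exact ha y hy

theorem pairwise_sorted_rev (f : Int → Int) (xs : List Int) :
    (PySem.List.sorted xs f true).Pairwise (fun a b => f b ≤ f a) := by
  induction xs using List.reverseRecOn with
  | nil => simp [PySem.List.sorted]
  | append_singleton xs x ih =>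
    rw [PySem.List.sorted_rev_eq_foldl_insertBy (xs ++ [x]) f, List.foldl_append,
      List.foldl_cons, List.foldl_nil, ← PySem.List.sorted_rev_eq_foldl_insertBy xs f]
    exact pairwise_insertBy f x _ ih

-- a stable reverse sort commutes with filtering
theorem filter_insertBy (f : Int → Int) (p : Int → Bool) (x : Int) (l : List Int)
    (hs : l.Pairwise (fun a b => f b ≤ f a)) :
    (PySem.List.insertBy (fun a b => decide (f b < f a)) x l).filter p
      = if p x then PySem.List.insertBy (fun a b => decide (f b < f a)) x (l.filter p)
        else l.filter p := by
  induction l with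
  | nil => by_cases hp : p x <;> simp [PySem.List.insertBy, hp]
  | cons h t ih =>
    rcases List.pairwise_cons.mp hs with ⟨ha, ht⟩
    rw [insertBy_cons_eq]
    by_cases hc : f h < f x
    · rw [if_pos (by simpa using hc)]
      have hall : ∀ y ∈ List.filter p (h :: t), f y < f x := by
        intro y hy
        rcases List.mem_cons.mp (List.mem_of_mem_filter hy) with hy' | hy'
        · subst hy'; exact hc
        · exact lt_of_le_of_lt (ha y hy') hc
      by_cases hp : p x
      · rw [if_pos hp, insertBy_all_bef f x _ hall, List.filter_cons_of_pos hp]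
      · rw [if_neg hp, List.filter_cons_of_neg (by simp [hp])]
    · rw [if_neg (by simpa using hc)]
      by_cases hph : p h
      · rw [List.filter_cons_of_pos hph, ih ht, List.filter_cons_of_pos hph]
        by_cases hp : p x
        · rw [if_pos hp, if_pos hp, insertBy_cons_eq, if_neg (by simpa using hc)]
        · rw [if_neg hp, if_neg hp]
      · rw [List.filter_cons_of_neg (by simp [hph]), ih ht,
          List.filter_cons_of_neg (by simp [hph])]

theorem sorted_rev_filter (f : Int → Int) (p : Int → Bool) (xs : List Int) :
    PySem.List.sorted (xs.filter p) f true = (PySem.List.sorted xs f true).filter p := by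
  induction xs using List.reverseRecOn with
  | nil => simp [PySem.List.sorted]
  | append_singleton xs x ih =>
    rw [PySem.List.sorted_rev_eq_foldl_insertBy (xs ++ [x]) f, List.foldl_append,
      List.foldl_cons, List.foldl_nil, ← PySem.List.sorted_rev_eq_foldl_insertBy xs f,
      filter_insertBy f p x _ (pairwise_sorted_rev f xs), List.filter_append]
    by_cases hp : p x
    · rw [if_pos hp]
      have hx1 : List.filter p [x] = [x] := by simp [hp]
      rw [hx1, PySem.List.sorted_rev_eq_foldl_insertBy (xs.filter p ++ [x]) f,
        List.foldl_append, List.foldl_cons, List.foldl_nil,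
        ← PySem.List.sorted_rev_eq_foldl_insertBy (xs.filter p) f, ih]
    · rw [if_neg hp]
      have hx1 : List.filter p [x] = [] := by simp [hp]
      rw [hx1, List.append_nil, ih]

-- B's pair scan over the counter items is the key scan paired with its count
theorem bestScan_map (C : Int → Int) (restk : List Int) : ∀ (k0 : Int),
    bestScan (k0, C k0) (restk.map (fun k => (k, C k)))
      = ((restk.foldl (fun b k => if C b < C k then k else b) k0),
         C (restk.foldl (fun b k => if C b < C k then k else b) k0)) := by
  induction restk with
  | nil => intro k0; simp [bestScan]
  | cons k restk ih =>
    intro k0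
    simp only [bestScan, List.map_cons, List.foldl_cons] at *
    by_cases hc : C k0 < C k
    · simpa [hc] using ih k
    · simpa [hc] using ih k0

-- the selection step: head / second element of the stable reverse sort vs the linear scans
theorem select_eq (S : List Int) (C : Int → Int) (hnd : S.Nodup) (hne : S ≠ []) :
    ((if PySem.List.pyGetD (PySem.List.sorted S C true) 0 0 = -1 then
        if 1 < S.length then PySem.List.pyGetD (PySem.List.sorted S C true) 1 0
        else PySem.List.pyGetD (PySem.List.sorted S C true) 0 0
      else PySem.List.pyGetD (PySem.List.sorted S C true) 0 0),
     C (if PySem.List.pyGetD (PySem.List.sorted S C true) 0 0 = -1 then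
        if 1 < S.length then PySem.List.pyGetD (PySem.List.sorted S C true) 1 0
        else PySem.List.pyGetD (PySem.List.sorted S C true) 0 0
      else PySem.List.pyGetD (PySem.List.sorted S C true) 0 0))
    = (match S.map (fun k => (k, C k)) with
       | [] => ((0 : Int), (0 : Int))
       | p :: rest =>
         if (bestScan p rest).1 = -1 ∧ 1 < S.length then
           match (S.map (fun k => (k, C k))).filter (fun q => q.1 != -1) with
           | [] => bestScan p rest
           | q :: rest2 => bestScan q rest2
         else bestScan p rest) := by
  obtain ⟨s0, st, rfl⟩ := List.exists_cons_of_ne_nil hne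
  have hrun : runBest C (s0 :: st) = some (st.foldl (fun b y => if C b < C y then y else b) s0) := by
    rw [runBest, List.foldl_cons, runBest_some]
  set m : Int := st.foldl (fun b y => if C b < C y then y else b) s0 with hmdef
  have hhead : (PySem.List.sorted (s0 :: st) C true).head? = some m := by
    rw [head?_sorted_rev, hrun]
  obtain ⟨tl, hsorted⟩ : ∃ tl, PySem.List.sorted (s0 :: st) C true = m :: tl := by
    cases hso : PySem.List.sorted (s0 :: st) C true with
    | nil => rw [hso] at hhead; simp at hhead
    | cons a tl =>
      rw [hso] at hhead; simp only [List.head?_cons, Option.some_inj] at hhead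
      exact ⟨tl, by rw [hhead]⟩
  have hget0 : PySem.List.pyGetD (PySem.List.sorted (s0 :: st) C true) 0 0 = m := by
    rw [hsorted]; simp [pysem]
  have hnodup : (m :: tl).Nodup := by
    rw [← hsorted]; exact (sorted_rev_perm C (s0 :: st)).nodup_iff.mpr hnd
  rw [List.map_cons]
  simp only [bestScan_map, ← hmdef, hget0]
  by_cases hm : m = -1
  · by_cases hlen : 1 < (s0 :: st).length
    · rw [if_pos hm, if_pos hlen, if_pos ⟨hm, hlen⟩]
      have hlen2 : 1 < (m :: tl).length := by
        rw [← hsorted, (sorted_rev_perm C (s0 :: st)).length_eq]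
        exact hlen
      obtain ⟨t0, tl', htl⟩ : ∃ t0 tl', tl = t0 :: tl' := by
        cases tl with
        | nil => simp at hlen2
        | cons a b => exact ⟨a, b, rfl⟩
      have hA2 : PySem.List.pyGetD (PySem.List.sorted (s0 :: st) C true) 1 0 = t0 := by
        rw [hsorted, htl]; simp [pysem]
      have hm_not_tl : m ∉ tl := (List.nodup_cons.mp hnodup).1
      have hfil : (m :: tl).filter (fun k => k != -1) = tl := by
        rw [List.filter_cons_of_neg (by simp [hm])]
        exact List.filter_eq_self.mpr (fun y hy => by
          simp only [bne_iff_ne, ne_eq]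
          intro hy1; rw [hy1, ← hm] at hy; exact hm_not_tl hy)
      have hsfil : PySem.List.sorted ((s0 :: st).filter (fun k => k != -1)) C true = tl := by
        rw [sorted_rev_filter, hsorted, hfil]
      have hfilne : (s0 :: st).filter (fun k => k != -1) ≠ [] := by
        intro hnil
        rw [hnil, htl] at hsfil
        simp [PySem.List.sorted] at hsfil
      obtain ⟨f0, ft, hF⟩ := List.exists_cons_of_ne_nil hfilne
      have hrunF : runBest C ((s0 :: st).filter (fun k => k != -1))
          = some (ft.foldl (fun b y => if C b < C y then y else b) f0) := by
        rw [hF, runBest, List.foldl_cons, runBest_some]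
      have hFbest : ft.foldl (fun b y => if C b < C y then y else b) f0 = t0 := by
        have hh := head?_sorted_rev C ((s0 :: st).filter (fun k => k != -1))
        rw [hsfil, htl, hrunF] at hh
        simpa using hh.symm
      have hcomp : ((fun q : Int × Int => q.1 != -1) ∘ (fun k : Int => (k, C k)))
          = (fun k : Int => k != -1) := rfl
      have hfilmap : (((s0, C s0) :: st.map (fun k => (k, C k))).filter (fun q => q.1 != -1))
          = ((s0 :: st).filter (fun k => k != -1)).map (fun k => (k, C k)) := by
        rw [show ((s0, C s0) :: st.map (fun k => (k, C k)))
              = (s0 :: st).map (fun k => (k, C k)) from by rw [List.map_cons],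
           List.filter_map, hcomp]
      rw [hfilmap, hF, List.map_cons]
      simp only [bestScan_map, hFbest, hA2]
    · rw [if_neg hlen, if_pos hm, if_neg (by rintro ⟨-, h2⟩; exact hlen h2)]
  · rw [if_neg hm, if_neg (by rintro ⟨h1, -⟩; exact hm h1)]

-- ===== VERDICT (by name: the statement is the Claim_ definition above) =====
theorem count_mode_spec : Claim_equal_count_mode := by
  intro array _ hpre
  unfold Pre_count_mode at hpre
  unfold Spec_count_mode count_mode count_mode_alt
  simp only [aDict, PySem.Dict.foldl_insert_getD_add_one_eq_counter, PySem.Dict.keys_counter,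
    PySem.Dict.items_counter, PySem.Dict.size, List.length_map, PySem.Dict.getD_counter]
  have hSne : PySem.Set.ofList array ≠ [] := by
    obtain ⟨a, t, rfl⟩ := List.exists_cons_of_ne_nil hpre
    exact List.ne_nil_of_mem ((PySem.Set.mem_ofList _ a).mpr (by simp))
  exact select_eq (PySem.Set.ofList array) (fun k => ((array.count k : Int)))
    (PySem.Set.nodup_ofList array) hSne
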